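-- pv_equiv track=rewrite | github.com/yensi-aiorg/YenSi-ChiefOps | backend/app/services/memory/assembler.py | _build_rag_section
-- ===== SOURCE A (Python) =====
-- RAG_CHUNKS_BUDGET = 3000
--
-- CHARS_PER_TOKEN = 4
--
-- def _build_rag_section(rag_chunks: list[str] | None) -> str:
--     """Build the RAG chunks section from Citex results."""
--     if not rag_chunks:
--         return ""
--
--     lines: list[str] = ["## Relevant Document Excerpts"]
--     total_chars = 0
--     max_chars = RAG_CHUNKS_BUDGET * CHARS_PER_TOKEN
--
--     for i, chunk in enumerate(rag_chunks):
--         if total_chars + len(chunk) > max_chars: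
--             remaining = max_chars - total_chars
--             if remaining > 100:
--                 lines.append(f"### Excerpt {i + 1}")
--                 lines.append(chunk[:remaining] + "...")
--             break
--
--         lines.append(f"### Excerpt {i + 1}")
--         lines.append(chunk)
--         lines.append("")
--         total_chars += len(chunk)
--
--     return "\n".join(lines)
-- ===== SOURCE B (Python) =====
-- RAG_CHUNKS_BUDGET = 3000
--
-- CHARS_PER_TOKEN = 4
--
-- def _build_rag_section(rag_chunks):
--     """Build the RAG chunks section from Citex results."""
--     if not rag_chunks:
--         return ""
--
--     max_chars = RAG_CHUNKS_BUDGET * CHARS_PER_TOKEN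
--
--     # Split phase: k = number of chunks that fit entirely, total = their length sum.
--     total = 0
--     k = 0
--     for chunk in rag_chunks:
--         if total + len(chunk) > max_chars:
--             break
--         total += len(chunk)
--         k += 1
--
--     # Render phase: header, then all fully-fitting chunks in one pass,
--     # then a truncated boundary chunk if enough budget is left for it.
--     out = "## Relevant Document Excerpts"
--     out += "".join(f"\n### Excerpt {j + 1}\n{rag_chunks[j]}\n" for j in range(k))
--     if k < len(rag_chunks):
--         remaining = max_chars - total
--         if remaining > 100:
--             out += f"\n### Excerpt {k + 1}\n{rag_chunks[k][:remaining]}..."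
--     return out
-- ===== Notes on version B (the rewrite author's own statement) =====
-- stated objective: alternative
-- what changed: A interleaves budget accounting and formatting in one accumulate-and-break loop over (lines, total_chars); B first computes the split point (number of fully fitting chunks and their total length) in a split phase, then renders header, fitting chunks and the optional truncated boundary chunk in a separate formatting pass via string concatenation instead of a list joined with '\n'.
import Mathlib
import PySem

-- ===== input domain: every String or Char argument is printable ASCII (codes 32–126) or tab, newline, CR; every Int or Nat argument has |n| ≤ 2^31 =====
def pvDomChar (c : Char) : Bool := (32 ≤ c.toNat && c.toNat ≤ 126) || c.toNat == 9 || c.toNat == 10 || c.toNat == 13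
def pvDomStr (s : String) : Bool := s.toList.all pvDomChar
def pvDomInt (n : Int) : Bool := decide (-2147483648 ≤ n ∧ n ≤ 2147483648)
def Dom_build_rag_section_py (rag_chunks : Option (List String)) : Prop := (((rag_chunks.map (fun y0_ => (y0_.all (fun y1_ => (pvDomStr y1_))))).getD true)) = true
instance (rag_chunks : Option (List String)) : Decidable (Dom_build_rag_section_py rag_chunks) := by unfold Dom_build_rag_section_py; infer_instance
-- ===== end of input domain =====

-- B replaces A's single accumulate-and-break loop (lines/total/index state) by a split phase
-- (count the fully fitting chunks) followed by a separate render phase; objective: alternative decomposition, same cost.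


-- ===== PORT A =====
-- the for-loop of A: state = (lines, total_chars), i the running enumerate index; 'break' ends the recursion
def pvALoop (maxChars : Int) : List String → Int → Int → List String → List String
  | [], _, _, lines => lines
  | chunk :: rest, i, total, lines =>
    if total + PySem.Str.len chunk > maxChars then
      let remaining := maxChars - total
      if remaining > 100 then
        lines ++ ["### Excerpt " ++ PySem.Int.toStr (i + 1),
                  PySem.Str.slice chunk none (some remaining) ++ "..."]
      else lines
    else
      pvALoop maxChars rest (i + 1) (total + PySem.Str.len chunk)
        (lines ++ ["### Excerpt " ++ PySem.Int.toStr (i + 1), chunk, ""])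

def build_rag_section_py (rag_chunks : Option (List String)) : String :=
  match rag_chunks with
  | none => ""
  | some chunks =>
    if chunks.isEmpty then ""   -- 'if not rag_chunks'
    else PySem.Str.join "\n" (pvALoop (3000 * 4) chunks 0 0 ["## Relevant Document Excerpts"])

-- ===== PORT B =====
-- split phase of Source B: returns (k, total) = (number of fully fitting chunks, sum of their lengths)
def pvBSplit (maxChars : Int) : List String → Int → Nat × Int
  | [], total => (0, total)
  | chunk :: rest, total =>
    if total + PySem.Str.len chunk > maxChars then (0, total)
    else
      let p := pvBSplit maxChars rest (total + PySem.Str.len chunk)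
      (p.1 + 1, p.2)

def build_rag_section_py_alt (rag_chunks : Option (List String)) : String :=
  match rag_chunks with
  | none => ""
  | some chunks =>
    if chunks.isEmpty then ""
    else
      let maxChars : Int := 3000 * 4
      let p := pvBSplit maxChars chunks 0
      let k := p.1
      let total := p.2
      let out := "## Relevant Document Excerpts" ++
        PySem.Str.join "" ((List.range k).map fun (j : Nat) =>
          "\n### Excerpt " ++ PySem.Int.toStr ((j : Int) + 1) ++ "\n" ++ chunks.getD j "" ++ "\n")
      if k < chunks.length then
        let remaining := maxChars - total
        if remaining > 100 then
          out ++ "\n### Excerpt " ++ PySem.Int.toStr ((k : Int) + 1) ++ "\n" ++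
            PySem.Str.slice (chunks.getD k "") none (some remaining) ++ "..."  -- index k is in range here
        else out
      else out

-- ===== PRECONDITION & SPEC =====
def Spec_build_rag_section_py (rag_chunks : Option (List String)) (out : String) : Prop := out = build_rag_section_py_alt rag_chunks
instance (rag_chunks : Option (List String)) (out : String) : Decidable (Spec_build_rag_section_py rag_chunks out) := by unfold Spec_build_rag_section_py; infer_instance

-- ===== CLAIM (what is proved, stated in full; the proofs are below) =====
def Claim_equal_build_rag_section_py : Prop := ∀ (rag_chunks : Option (List String)), Dom_build_rag_section_py rag_chunks → Spec_build_rag_section_py rag_chunks (build_rag_section_py rag_chunks)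

-- ===== LEMMAS AND PROOFS =====

-- what B renders after the header, for a suffix of the chunk list whose first element has absolute index i
def pvTail (maxChars : Int) (cs : List String) (i : Int) (total : Int) : String :=
  let p := pvBSplit maxChars cs total
  PySem.Str.join "" ((List.range p.1).map fun (j : Nat) =>
      "\n### Excerpt " ++ PySem.Int.toStr (i + (j : Int) + 1) ++ "\n" ++ cs.getD j "" ++ "\n") ++
  (if p.1 < cs.length ∧ maxChars - p.2 > 100 then
      "\n### Excerpt " ++ PySem.Int.toStr (i + (p.1 : Int) + 1) ++ "\n" ++
        PySem.Str.slice (cs.getD p.1 "") none (some (maxChars - p.2)) ++ "..."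
   else "")

theorem pv_chars_join_empty_cons (x : List Char) (xs : List (List Char)) :
    PySem.Chars.join [] (x :: xs) = x ++ PySem.Chars.join [] xs := by
  cases xs with
  | nil => simp [PySem.Chars.join_singleton, PySem.Chars.join_nil]
  | cons y ys => simp [PySem.Chars.join_cons_cons]

theorem pv_chars_join_append_singleton (sep x : List Char) (acc : List (List Char)) (h : acc ≠ []) :
    PySem.Chars.join sep (acc ++ [x]) = PySem.Chars.join sep acc ++ sep ++ x := by
  induction acc with
  | nil => exact absurd rfl h
  | cons a rest ih =>
    cases rest with
    | nil => simp [PySem.Chars.join_cons_cons, PySem.Chars.join_singleton]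
    | cons b t =>
      simp only [List.cons_append, PySem.Chars.join_cons_cons]
      rw [← List.cons_append, ih (by simp)]
      simp [List.append_assoc]

theorem pv_join_empty_cons (x : String) (xs : List String) :
    PySem.Str.join "" (x :: xs) = x ++ PySem.Str.join "" xs := by
  apply String.toList_inj.mp
  simp [PySem.Str.toList_join, pv_chars_join_empty_cons]

theorem pv_join_append_singleton (sep x : String) (acc : List String) (h : acc ≠ []) :
    PySem.Str.join sep (acc ++ [x]) = PySem.Str.join sep acc ++ sep ++ x := by
  apply String.toList_inj.mp
  rw [PySem.Str.toList_join, List.map_append, List.map_singleton,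
    pv_chars_join_append_singleton _ _ _ (by simpa using h)]
  simp [PySem.Str.toList_join, List.append_assoc]

theorem pv_join_singleton (x : String) : PySem.Str.join "\n" [x] = x := by
  apply String.toList_inj.mp
  simp [PySem.Str.toList_join, PySem.Chars.join_singleton]

theorem pv_join_nil (sep : String) : PySem.Str.join sep [] = "" := by
  apply String.toList_inj.mp
  simp [PySem.Str.toList_join, PySem.Chars.join_nil]

theorem pv_lit_excerpt : "\n" ++ "### Excerpt " = "\n### Excerpt " := by decide

theorem pv_nl_excerpt (X : String) :
    "\n" ++ ("### Excerpt " ++ X) = "\n### Excerpt " ++ X := by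
  rw [← String.append_assoc, pv_lit_excerpt]

theorem pv_loop_tail (maxChars : Int) (cs : List String) (i total : Int) (acc : List String)
    (h : acc ≠ []) :
    PySem.Str.join "\n" (pvALoop maxChars cs i total acc)
      = PySem.Str.join "\n" acc ++ pvTail maxChars cs i total := by
  induction cs generalizing i total acc with
  | nil =>
    simp [pvALoop, pvTail, pvBSplit, pv_join_nil]
  | cons chunk rest ih =>
    by_cases hb : total + PySem.Str.len chunk > maxChars
    · by_cases h2 : maxChars - total > 100
      · simp only [pvALoop, if_pos hb, if_pos h2, pvTail, pvBSplit]
        rw [show acc ++ ["### Excerpt " ++ PySem.Int.toStr (i + 1),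
              PySem.Str.slice chunk none (some (maxChars - total)) ++ "..."]
            = (acc ++ ["### Excerpt " ++ PySem.Int.toStr (i + 1)]) ++
              [PySem.Str.slice chunk none (some (maxChars - total)) ++ "..."] from by simp]
        rw [pv_join_append_singleton _ _ _ (by simp), pv_join_append_singleton _ _ _ h]
        rw [if_pos ⟨by simp, h2⟩]
        simp only [pv_join_nil, String.append_assoc, String.empty_append,
          Nat.cast_zero, add_zero, List.getD_cons_zero, pv_nl_excerpt, List.range_zero,
          List.map_nil]
      · simp only [pvALoop, if_pos hb, if_neg h2, pvTail, pvBSplit]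
        rw [if_neg (by exact fun hc => h2 hc.2)]
        simp [pv_join_nil]
    · simp only [pvALoop, if_neg hb, pvTail, pvBSplit]
      rw [ih _ _ _ (by simp)]
      rw [show acc ++ ["### Excerpt " ++ PySem.Int.toStr (i + 1), chunk, ""]
          = ((acc ++ ["### Excerpt " ++ PySem.Int.toStr (i + 1)]) ++ [chunk]) ++ [""] from by simp]
      rw [pv_join_append_singleton _ _ _ (by simp), pv_join_append_singleton _ _ _ (by simp),
          pv_join_append_singleton _ _ _ h]
      rw [List.range_succ_eq_map, List.map_cons, List.map_map, pv_join_empty_cons]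
      simp only [pvTail, List.getD_cons_succ, List.getD_cons_zero, List.length_cons,
        Nat.cast_zero, Nat.cast_add, Nat.cast_one, add_zero, Nat.add_lt_add_iff_right]
      have harg : ∀ x : Int, i + (x + 1) + 1 = i + 1 + x + 1 := fun x => by ring
      simp only [Function.comp_def, Nat.cast_succ, List.getD_cons_succ, harg,
        String.append_assoc, String.append_empty, pv_nl_excerpt]

theorem pv_final (chunks : List String) (he : chunks.isEmpty = false) :
    build_rag_section_py (some chunks) = build_rag_section_py_alt (some chunks) := by
  simp only [build_rag_section_py, build_rag_section_py_alt, he, Bool.false_eq_true, if_false]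
  rw [pv_loop_tail _ _ _ _ _ (by simp), pv_join_singleton]
  simp only [pvTail, zero_add]
  by_cases h1 : (pvBSplit (3000 * 4) chunks 0).1 < chunks.length
  · by_cases h2 : (3000 : Int) * 4 - (pvBSplit (3000 * 4) chunks 0).2 > 100
    · rw [if_pos ⟨h1, h2⟩, if_pos h1, if_pos h2]
      simp [String.append_assoc]
    · rw [if_neg (fun hc => h2 hc.2), if_pos h1, if_neg h2]
      simp
  · rw [if_neg (fun hc => h1 hc.1), if_neg h1]
    simp

-- ===== VERDICT (by name: the statement is the Claim_ definition above) =====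
theorem build_rag_section_py_spec : Claim_equal_build_rag_section_py := by
  intro rc _
  unfold Spec_build_rag_section_py
  cases rc with
  | none => rfl
  | some chunks =>
    by_cases he : chunks.isEmpty
    · simp [build_rag_section_py, build_rag_section_py_alt, he]
    · exact pv_final chunks (by simpa using he)
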